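-- pv_equiv track=rewrite | github.com/QingAz/Liquidsugar_Lag | run_stage2_lag_stdlib.py | contiguous_split_ranges
-- ===== SOURCE A (Python) =====
-- from typing import Any, Dict, Iterable, List, NamedTuple, Optional, Sequence, Tuple, Union
--
-- def contiguous_split_ranges(rows: Sequence[Dict[str, Any]]) -> List[Tuple[str, int, int]]:
--     ranges: List[Tuple[str, int, int]] = []
--     if not rows:
--         return ranges
--
--     start = 0
--     current_split = str(rows[0]["split"])
--     for index in range(1, len(rows)):
--         next_split = str(rows[index]["split"])
--         if next_split != current_split:
--             ranges.append((current_split, start, index - 1))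
--             start = index
--             current_split = next_split
--     ranges.append((current_split, start, len(rows) - 1))
--     return ranges
-- ===== SOURCE B (Python) =====
-- from typing import Any, Dict, List, Sequence, Tuple
--
--
-- def _rle(splits: List[str]) -> List[Tuple[str, int]]:
--     # run-length encode: scan one whole run at a time
--     runs: List[Tuple[str, int]] = []
--     i = 0
--     n = len(splits)
--     while i < n:
--         j = i + 1
--         while j < n and splits[j] == splits[i]:
--             j += 1
--         runs.append((splits[i], j - i))
--         i = j
--     return runs
--
--
-- def _emit(start: int, runs: List[Tuple[str, int]]) -> List[Tuple[str, int, int]]: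
--     out: List[Tuple[str, int, int]] = []
--     for value, count in runs:
--         out.append((value, start, start + count - 1))
--         start += count
--     return out
--
--
-- def contiguous_split_ranges(rows: Sequence[Dict[str, Any]]) -> List[Tuple[str, int, int]]:
--     splits = [str(row["split"]) for row in rows]
--     return _emit(0, _rle(splits))
-- ===== Notes on version B (the rewrite author's own statement) =====
-- stated objective: alternative
-- what changed: Replaces A's single-pass transition state machine with a two-phase decomposition: run-length encode the split column (scanning one whole run at a time), then emit (value, start, end) ranges from the run lengths by a prefix-sum pass.
import Mathlib
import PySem

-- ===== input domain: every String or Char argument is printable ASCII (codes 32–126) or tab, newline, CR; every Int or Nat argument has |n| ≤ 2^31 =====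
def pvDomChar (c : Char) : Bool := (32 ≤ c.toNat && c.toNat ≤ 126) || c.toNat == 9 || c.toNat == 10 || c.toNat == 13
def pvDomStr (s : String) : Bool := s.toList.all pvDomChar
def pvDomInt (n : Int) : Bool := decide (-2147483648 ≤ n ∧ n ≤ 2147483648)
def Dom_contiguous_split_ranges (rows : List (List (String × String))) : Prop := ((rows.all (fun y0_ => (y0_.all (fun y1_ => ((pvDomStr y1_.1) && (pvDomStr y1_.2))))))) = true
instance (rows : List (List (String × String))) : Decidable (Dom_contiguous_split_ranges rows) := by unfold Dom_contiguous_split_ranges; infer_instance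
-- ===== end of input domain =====

-- B replaces A's single-pass transition state machine with run-length encoding
-- (one whole run scanned at a time) followed by a prefix-sum emit pass; same cost.

-- ===== PORT A =====
-- row["split"] is a first-match lookup in the association list; Pre_ guarantees it
-- succeeds, so the `.getD ""` default is never taken on admitted inputs.
def pvSplitOf (row : List (String × String)) : String :=
  (List.lookup "split" row).getD ""

-- the `for index in range(1, len(rows))` loop of A, as structural recursion over the
-- remaining rows carrying the same state (ranges, start, current_split) and the index
def pvALoop : List (List (String × String)) → List (String × Int × Int) → Int → String → Int →
    List (String × Int × Int) × Int × String
  | [], ranges, start, cur, _ => (ranges, start, cur)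
  | r :: rest, ranges, start, cur, index =>
    let next := pvSplitOf r
    if next ≠ cur then
      pvALoop rest (ranges ++ [(cur, start, index - 1)]) index next (index + 1)
    else
      pvALoop rest ranges start cur (index + 1)

def contiguous_split_ranges (rows : List (List (String × String))) : List (String × Int × Int) :=
  match rows with
  | [] => []
  | r0 :: rest =>
    let t := pvALoop rest [] 0 (pvSplitOf r0) 1
    t.1 ++ [(t.2.2, t.2.1, (rows.length : Int) - 1)]

-- ===== PORT B =====
-- _rle: scan one whole run at a time (the inner while advances over equal splits)
def pvRle : List String → List (String × Int)
  | [] => []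
  | x :: xs =>
    let k := (xs.takeWhile (· == x)).length
    (x, (k : Int) + 1) :: pvRle (xs.drop k)
termination_by l => l.length
decreasing_by simp

-- _emit: turn (value, count) runs into (value, start, end) ranges, accumulating start
def pvEmit : Int → List (String × Int) → List (String × Int × Int)
  | _, [] => []
  | start, (v, c) :: rest => (v, start, start + c - 1) :: pvEmit (start + c) rest

def contiguous_split_ranges_alt (rows : List (List (String × String))) : List (String × Int × Int) :=
  pvEmit 0 (pvRle (rows.map pvSplitOf))

-- ===== PRECONDITION & SPEC =====
-- Pre_ excludes exactly the inputs on which A raises KeyError: a row without a "split" key.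
def Pre_contiguous_split_ranges (rows : List (List (String × String))) : Prop :=
  (rows.all (fun r => (List.lookup "split" r).isSome)) = true
instance (rows : List (List (String × String))) : Decidable (Pre_contiguous_split_ranges rows) := by
  unfold Pre_contiguous_split_ranges; infer_instance

def pvWitness_contiguous_split_ranges : (List (List (String × String))) :=
  [[("split", "train")], [("split", "train")], [("split", "test")]]

def Spec_contiguous_split_ranges (rows : List (List (String × String))) (out : List (String × Int × Int)) : Prop := out = contiguous_split_ranges_alt rows
instance (rows : List (List (String × String))) (out : List (String × Int × Int)) : Decidable (Spec_contiguous_split_ranges rows out) := by unfold Spec_contiguous_split_ranges; infer_instance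

-- ===== CLAIM (what is proved, stated in full; the proofs are below) =====
def Claim_equal_contiguous_split_ranges : Prop := ∀ (rows : List (List (String × String))), Dom_contiguous_split_ranges rows → Pre_contiguous_split_ranges rows → Spec_contiguous_split_ranges rows (contiguous_split_ranges rows)

-- ===== LEMMAS AND PROOFS =====

lemma pv_takeWhile_replicate_ne (c x : String) (xs : List String) (j : Nat) (h : x ≠ c) :
    (List.replicate j c ++ x :: xs).takeWhile (· == c) = List.replicate j c := by
  induction j with
  | zero => simp [h]
  | succ n ih => simp [List.replicate_succ, ih]

lemma pv_takeWhile_replicate_self (c : String) (j : Nat) :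
    (List.replicate j c).takeWhile (· == c) = List.replicate j c := by
  induction j with
  | zero => simp
  | succ n ih => simp [List.replicate_succ, ih]

lemma pv_rle_replicate_ne (c x : String) (xs : List String) (j : Nat) (h : x ≠ c) :
    pvRle (List.replicate (j + 1) c ++ x :: xs) = (c, (j : Int) + 1) :: pvRle (x :: xs) := by
  rw [List.replicate_succ, List.cons_append]
  simp only [pvRle]
  have ht := pv_takeWhile_replicate_ne c x xs j h
  have hd : (List.replicate j c ++ x :: xs).drop j = x :: xs := by
    simp
  simp only [ht, List.length_replicate, hd]
  simp only [pvRle]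

lemma pv_rle_replicate (c : String) (j : Nat) :
    pvRle (List.replicate (j + 1) c) = [(c, (j : Int) + 1)] := by
  rw [List.replicate_succ]
  simp only [pvRle]
  have ht := pv_takeWhile_replicate_self c j
  simp [ht, pvRle]

lemma pv_replicate_shift (c : String) (j : Nat) (l : List String) :
    List.replicate (j + 1) c ++ c :: l = List.replicate (j + 2) c ++ l := by
  have : List.replicate (j + 2) c = List.replicate (j + 1) c ++ [c] := by
    simpa using (List.replicate_succ' (a := c) (n := j + 1))
  simp [this]

lemma pvMain (rest : List (List (String × String))) :
    ∀ (acc : List (String × Int × Int)) (cur : String) (start : Int) (j : Nat),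
    (let t := pvALoop rest acc start cur (start + ((j : Int) + 1));
     t.1 ++ [(t.2.2, t.2.1, start + ((j : Int) + 1) + (rest.length : Int) - 1)])
    = acc ++ pvEmit start (pvRle (List.replicate (j + 1) cur ++ rest.map pvSplitOf)) := by
  induction rest with
  | nil =>
    intro acc cur start j
    simp [pvALoop, pv_rle_replicate, pvEmit]
  | cons r rs ih =>
    intro acc cur start j
    by_cases hx : pvSplitOf r = cur
    · -- same split: the loop keeps state, the run grows by one
      have step : pvALoop (r :: rs) acc start cur (start + ((j : Int) + 1))
          = pvALoop rs acc start cur (start + (((j + 1 : Nat) : Int) + 1)) := by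
        simp [pvALoop, hx]
        try ring_nf
      rw [step]
      have := ih acc cur start (j + 1)
      simp only at this
      rw [show start + ((j : Int) + 1) + ((List.length (r :: rs) : Nat) : Int) - 1
            = start + (((j + 1 : Nat) : Int) + 1) + ((rs.length : Nat) : Int) - 1 by
        push_cast [List.length_cons]; ring]
      rw [this]
      rw [show (r :: rs).map pvSplitOf = cur :: rs.map pvSplitOf by simp [hx]]
      rw [pv_replicate_shift]
    · -- split changes: A closes the range; B's rle splits off the (cur, j+1) run
      have step : pvALoop (r :: rs) acc start cur (start + ((j : Int) + 1))
          = pvALoop rs (acc ++ [(cur, start, start + ((j : Int) + 1) - 1)])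
              (start + ((j : Int) + 1)) (pvSplitOf r)
              ((start + ((j : Int) + 1)) + (((0 : Nat) : Int) + 1)) := by
        simp [pvALoop, hx]
        try ring_nf
      rw [step]
      have := ih (acc ++ [(cur, start, start + ((j : Int) + 1) - 1)]) (pvSplitOf r)
        (start + ((j : Int) + 1)) 0
      simp only at this
      rw [show start + ((j : Int) + 1) + ((List.length (r :: rs) : Nat) : Int) - 1
            = (start + ((j : Int) + 1)) + (((0 : Nat) : Int) + 1) + ((rs.length : Nat) : Int) - 1 by
        push_cast [List.length_cons]; ring]
      rw [this]
      rw [show (r :: rs).map pvSplitOf = pvSplitOf r :: rs.map pvSplitOf by simp]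
      rw [pv_rle_replicate_ne cur (pvSplitOf r) (rs.map pvSplitOf) j hx]
      simp [pvEmit, List.append_assoc]

-- ===== VERDICT (by name: the statement is the Claim_ definition above) =====
theorem contiguous_split_ranges_spec : Claim_equal_contiguous_split_ranges := by
  intro rows _ _
  unfold Spec_contiguous_split_ranges
  match rows with
  | [] => simp [contiguous_split_ranges, contiguous_split_ranges_alt, pvRle, pvEmit]
  | r0 :: rest =>
    unfold contiguous_split_ranges contiguous_split_ranges_alt
    have := pvMain rest [] (pvSplitOf r0) 0 0
    simp only at this
    rw [show ((List.length (r0 :: rest) : Nat) : Int) - 1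
          = 0 + (((0 : Nat) : Int) + 1) + ((rest.length : Nat) : Int) - 1 by
      push_cast [List.length_cons]; ring]
    rw [show (0 : Int) + (((0 : Nat) : Int) + 1) = 0 + (((0 : Nat) : Int) + 1) from rfl] at this
    simp only [List.nil_append] at this
    rw [show (1 : Int) = 0 + (((0 : Nat) : Int) + 1) by norm_num]
    exact this
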